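-- pv_equiv track=rewrite | github.com/foolwolf0068/feilearngit | python18.py | leijia
-- ===== SOURCE A (Python) =====
-- def leijia(a,n):
--     x=str(a)
--     sum1=0
--     L=[]
--     for i in range(1,n+1):
--         L.append(x*i)
--     for j in range(len(L)):
--         sum1+=int(L[j])
--
--     return sum1
-- ===== SOURCE B (Python) =====
-- def leijia(a, n):
--     x = str(a)
--     total = 0
--     cur = ""
--     for _ in range(n):
--         cur += x
--         total += int(cur)
--     return total
-- ===== Notes on version B (the rewrite author's own statement) =====
-- stated objective: simpler
-- what changed: Replaces A's two passes (materialize the list of repeated strings, then index through it summing int(L[j])) with a single loop that grows one running string by x per step and accumulates the sum directly, so no list and no per-step re-repetition x*i is built.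
import Mathlib
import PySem

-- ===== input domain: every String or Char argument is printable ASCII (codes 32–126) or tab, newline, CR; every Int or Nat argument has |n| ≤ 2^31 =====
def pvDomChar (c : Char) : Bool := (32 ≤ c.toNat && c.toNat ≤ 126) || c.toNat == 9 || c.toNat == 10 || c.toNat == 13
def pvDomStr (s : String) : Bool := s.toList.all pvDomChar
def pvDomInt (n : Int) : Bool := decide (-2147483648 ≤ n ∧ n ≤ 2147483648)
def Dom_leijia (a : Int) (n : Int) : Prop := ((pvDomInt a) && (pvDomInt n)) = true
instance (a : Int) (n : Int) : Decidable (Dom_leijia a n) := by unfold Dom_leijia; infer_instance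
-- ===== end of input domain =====

-- B replaces A's two passes (build the list of repeated strings, then index through it) with one
-- loop that grows a running string and accumulates the sum; same return value on Pre_.


-- ===== PORT A =====
def leijia (a : Int) (n : Int) : Int :=
  let x := PySem.Int.toChars a                       -- x = str(a)
  -- for i in range(1, n+1): L.append(x*i)
  let L : List (List Char) :=
    (PySem.List.pyRange 1 (n + 1)).foldl (fun acc i => acc ++ [PySem.List.pyRepeat x i]) []
  -- for j in range(len(L)): sum1 += int(L[j])   (int() raising ValueError is excluded by Pre_)
  let sum1 : Int :=
    (PySem.List.pyRange 0 (L.length : Int)).foldl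
      (fun acc j => acc + ((PySem.List.pyGet? L j).bind PySem.Int.ofChars?).getD 0) 0
  sum1

-- ===== PORT B =====
def leijia_alt (a : Int) (n : Int) : Int :=
  let x := PySem.Int.toChars a                       -- x = str(a)
  -- for _ in range(n): cur += x; total += int(cur)
  ((PySem.List.pyRange 0 n).foldl
      (fun (st : List Char × Int) _ =>
        let cur := st.1 ++ x
        (cur, st.2 + (PySem.Int.ofChars? cur).getD 0))
      (([] : List Char), (0 : Int))).2

-- ===== PRECONDITION & SPEC =====
-- Pre_ excludes a < 0 together with n ≥ 2: there str(a)*i contains an inner '-' and Python's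
-- int() raises ValueError (in A and in B alike).
def Pre_leijia (a : Int) (n : Int) : Prop := 0 ≤ a ∨ n ≤ 1
instance (a : Int) (n : Int) : Decidable (Pre_leijia a n) := by unfold Pre_leijia; infer_instance
def pvWitness_leijia : Int × Int := (12, 3)

def Spec_leijia (a : Int) (n : Int) (out : Int) : Prop := out = leijia_alt a n
instance (a : Int) (n : Int) (out : Int) : Decidable (Spec_leijia a n out) := by unfold Spec_leijia; infer_instance

-- ===== CLAIM (what is proved, stated in full; the proofs are below) =====
def Claim_equal_leijia : Prop := ∀ (a : Int) (n : Int), Dom_leijia a n → Pre_leijia a n → Spec_leijia a n (leijia a n)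

-- ===== LEMMAS AND PROOFS =====

-- value contributed by one parsed string
def pvVal (s : List Char) : Int := (PySem.Int.ofChars? s).getD 0

-- x repeated k times
def pvRep (x : List Char) (k : Nat) : List Char := (List.replicate k x).flatten

-- Σ_{i=1}^{k} pvVal (pvRep x i)
def pvSum (x : List Char) : Nat → Int
  | 0 => 0
  | k + 1 => pvSum x k + pvVal (pvRep x (k + 1))

theorem pvRep_succ (x : List Char) (k : Nat) : pvRep x (k + 1) = x ++ pvRep x k := by
  simp [pvRep, List.replicate_succ]

theorem pvRep_append (x : List Char) (k : Nat) : pvRep x k ++ x = pvRep x (k + 1) := by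
  induction k with
  | zero => simp [pvRep]
  | succ m ih => rw [pvRep_succ, pvRep_succ, List.append_assoc, ih]

-- A's sum over pyRange 1 (m+1) equals pvSum, by induction on the range's upper end
theorem pvA_sum (x : List Char) (k : Nat) :
    ((PySem.List.pyRange 1 ((k : Int) + 1)).map (fun i => pvVal (PySem.List.pyRepeat x i))).sum
      = pvSum x k := by
  induction k with
  | zero => rfl
  | succ m ih =>
    have h : (1 : Int) ≤ (m : Int) + 1 := by omega
    have : ((m : Int) + 1 + 1) = (((m + 1 : Nat) : Int)) + 1 := by push_cast; ring
    rw [← this, PySem.List.pyRange_one_succ_right h, List.map_append, List.sum_append, ih]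
    have hrep : PySem.List.pyRepeat x ((m : Int) + 1) = pvRep x (m + 1) := by
      simp [PySem.List.pyRepeat, pvRep]
    simp [pvSum, hrep]

-- B's loop ignores the element; its running total is pvVal-sums shifted by the prefix cur
def pvSumFrom (x c : List Char) : Nat → Int
  | 0 => 0
  | k + 1 => pvVal (c ++ x) + pvSumFrom x (c ++ x) k

theorem pvB_fold (x : List Char) (l : List Int) : ∀ (c : List Char) (t : Int),
    (l.foldl
      (fun (st : List Char × Int) _ =>
        (st.1 ++ x, st.2 + (PySem.Int.ofChars? (st.1 ++ x)).getD 0)) (c, t)).2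
      = t + pvSumFrom x c l.length := by
  induction l with
  | nil => intro c t; simp [pvSumFrom]
  | cons y ys ih =>
    intro c t
    simp only [List.foldl_cons, List.length_cons]
    rw [ih (c ++ x) (t + (PySem.Int.ofChars? (c ++ x)).getD 0)]
    simp [pvSumFrom, pvVal]
    ring

theorem pvSumFrom_rep (x : List Char) (k : Nat) : ∀ (j : Nat),
    pvSumFrom x (pvRep x j) k = pvSum x (j + k) - pvSum x j := by
  induction k with
  | zero => intro j; simp [pvSumFrom]
  | succ m ih =>
    intro j
    have h1 : pvRep x j ++ x = pvRep x (j + 1) := pvRep_append x j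
    simp only [pvSumFrom, h1]
    rw [ih (j + 1)]
    have : j + (m + 1) = (j + 1) + m := by omega
    rw [this]
    simp [pvSum, pvVal]
    ring

theorem pvSumFrom_nil (x : List Char) (k : Nat) : pvSumFrom x [] k = pvSum x k := by
  have h : pvRep x 0 = [] := by simp [pvRep]
  have := pvSumFrom_rep x k 0
  rw [h] at this
  simpa [pvSum] using this

-- indexing through a list over range(len(...)) is just mapping over the list
theorem pvIndex_map (L : List (List Char)) :
    ((List.range L.length).map
        (fun k => ((L[k]?).bind PySem.Int.ofChars?).getD 0))
      = L.map pvVal := by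
  apply List.ext_getElem
  · simp
  · intro i h1 h2
    simp only [List.getElem_map, List.getElem_range]
    have : i < L.length := by simpa using h1
    simp [List.getElem?_eq_getElem this, pvVal]

theorem pvA_eq (a : Int) (n : Int) : leijia a n = pvSum (PySem.Int.toChars a) n.toNat := by
  simp only [leijia]
  rw [PySem.List.foldl_append_singleton_eq_map (f := fun i => PySem.List.pyRepeat (PySem.Int.toChars a) i)]
  rw [PySem.List.foldl_add]
  simp only [List.nil_append, List.length_map, zero_add]
  rw [PySem.List.pyRange_zero]
  rw [Int.toNat_natCast, List.map_map]
  have hcomp :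
      ((fun j => ((PySem.List.pyGet? ((PySem.List.pyRange 1 (n + 1)).map (fun i => PySem.List.pyRepeat (PySem.Int.toChars a) i)) j).bind PySem.Int.ofChars?).getD 0) ∘ fun k : Nat => (k : Int))
      = fun k : Nat => ((((PySem.List.pyRange 1 (n + 1)).map (fun i => PySem.List.pyRepeat (PySem.Int.toChars a) i))[k]?).bind PySem.Int.ofChars?).getD 0 := by
    funext k
    simp [Function.comp, PySem.List.pyGet?_natCast]
  rw [hcomp]
  have hlen : (PySem.List.pyRange 1 (n + 1)).length
      = ((PySem.List.pyRange 1 (n + 1)).map (fun i => PySem.List.pyRepeat (PySem.Int.toChars a) i)).length := by simp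
  rw [hlen, pvIndex_map, List.map_map]
  have hn : (PySem.List.pyRange 1 (n + 1)).length = (n.toNat : Nat) := by
    rw [PySem.List.length_pyRange_one]; omega
  have hcast : (n + 1 : Int) = ((n.toNat : Int) + 1) ∨ n + 1 ≤ 1 := by omega
  rcases hcast with h | h
  · rw [h]
    exact pvA_sum (PySem.Int.toChars a) n.toNat
  · rw [PySem.List.pyRange_one_eq_nil h]
    have : n.toNat = 0 := by omega
    simp [this, pvSum]
  
theorem pvB_eq (a : Int) (n : Int) : leijia_alt a n = pvSum (PySem.Int.toChars a) n.toNat := by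
  simp only [leijia_alt]
  rw [pvB_fold]
  rw [PySem.List.length_pyRange_one]
  have : (n - 0).toNat = n.toNat := by omega
  rw [this, pvSumFrom_nil]
  ring

-- ===== VERDICT (by name: the statement is the Claim_ definition above) =====
theorem leijia_spec : Claim_equal_leijia := by
  intro a n _ _
  unfold Spec_leijia
  rw [pvA_eq, pvB_eq]
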